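-- pv_equiv track=rewrite | github.com/astrobin/astrobin | astrobin/utils.py | base26_encode
-- ===== SOURCE A (Python) =====
-- ALPHABET = "ABCDEFGHIJKLMNOPQRSTUVWXYZ"
--
-- def base26_encode(num, alphabet=ALPHABET):
--     """Encode a number in Base X
--
--     `num`: The number to encode
--     `alphabet`: The alphabet to use for encoding
--     """
--     if (num == 0):
--         return alphabet[0]
--     arr = []
--     base = len(alphabet)
--     while num:
--         rem = num % base
--         num = num // base
--         arr.append(alphabet[rem])
--     arr.reverse()
--     return ''.join(arr)
-- ===== SOURCE B (Python) =====
-- ALPHABET = "ABCDEFGHIJKLMNOPQRSTUVWXYZ"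
--
-- def base26_encode(num, alphabet=ALPHABET):
--     """Encode a number in Base X, emitting digits most-significant first.
--
--     Finds the highest needed power of the base, then peels digits off the
--     top by division, so no list reversal is needed.
--     """
--     if num == 0:
--         return alphabet[0]
--     base = len(alphabet)
--     k = 1
--     p = base
--     while p <= num:
--         k += 1
--         p *= base
--     out = []
--     while k:
--         p //= base
--         out.append(alphabet[num // p % base])
--         k -= 1
--     return ''.join(out)
-- ===== Notes on version B (the rewrite author's own statement) =====
-- stated objective: alternative
-- what changed: Instead of collecting least-significant digits in a list and reversing, B first finds the highest needed power of the base and then extracts digits most-significant first by dividing by descending powers, so no reversal or list accumulation of remainders is needed.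
import Mathlib
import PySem

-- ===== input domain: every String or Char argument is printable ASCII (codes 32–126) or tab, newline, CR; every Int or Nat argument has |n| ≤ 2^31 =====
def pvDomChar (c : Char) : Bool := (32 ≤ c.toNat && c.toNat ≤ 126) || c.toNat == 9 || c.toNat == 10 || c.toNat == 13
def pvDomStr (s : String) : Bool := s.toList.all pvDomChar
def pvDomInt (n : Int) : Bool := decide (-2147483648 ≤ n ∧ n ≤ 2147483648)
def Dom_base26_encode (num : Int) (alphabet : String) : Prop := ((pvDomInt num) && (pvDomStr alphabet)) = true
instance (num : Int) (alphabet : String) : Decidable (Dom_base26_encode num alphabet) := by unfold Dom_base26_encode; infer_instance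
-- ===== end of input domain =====

-- B replaces A's least-significant-digit list + reverse with most-significant-first digit extraction by descending powers of the base (alternative decomposition, same cost).


-- ===== PORT A =====
-- while num: rem = num % base; num = num // base; arr.append(alphabet[rem])
-- fuel-guarded loop (fuel only makes the loop total; on Pre_ num.toNat+1 steps suffice)
def pvALoop (fuel : Nat) (num base : Int) (alphabet : List Char) (arr : List Char) : List Char :=
  match fuel with
  | 0 => arr
  | fuel + 1 =>
    if num = 0 then arr
    else
      let rem := PySem.Int.mod num base
      let num' := PySem.Int.floordiv num base
      pvALoop fuel num' base alphabet (arr ++ [(PySem.List.pyGet? alphabet rem).getD 'A'])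

def base26_encode (num : Int) (alphabet : String) : String :=
  if num = 0 then
    -- alphabet[0]; none = IndexError, excluded by Pre_
    match PySem.List.pyGet? alphabet.toList (0 : Int) with
    | some c => String.mk [c]
    | none => ""
  else
    let base : Int := PySem.Str.len alphabet
    let arr := pvALoop (num.toNat + 1) num base alphabet.toList []
    String.mk arr.reverse      -- arr.reverse(); ''.join(arr)

-- ===== PORT B =====
-- first loop: k = 1; p = base; while p <= num: k += 1; p *= base
def pvBPowLoop (fuel : Nat) (k p num base : Int) : Int × Int :=
  match fuel with
  | 0 => (k, p)
  | fuel + 1 =>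
    if p ≤ num then pvBPowLoop fuel (k + 1) (p * base) num base else (k, p)

-- second loop: while k: p //= base; out.append(alphabet[num // p % base]); k -= 1
def pvBDigitLoop (fuel : Nat) (k p num base : Int) (alphabet : List Char) (out : List Char) : List Char :=
  match fuel with
  | 0 => out
  | fuel + 1 =>
    if k = 0 then out
    else
      let p' := PySem.Int.floordiv p base
      let c := (PySem.List.pyGet? alphabet
                 (PySem.Int.mod (PySem.Int.floordiv num p') base)).getD 'A'
      pvBDigitLoop fuel (k - 1) p' num base alphabet (out ++ [c])

def base26_encode_alt (num : Int) (alphabet : String) : String :=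
  if num = 0 then
    match PySem.List.pyGet? alphabet.toList (0 : Int) with
    | some c => String.mk [c]
    | none => ""
  else
    let base : Int := PySem.Str.len alphabet
    let kp := pvBPowLoop (num.toNat + 1) 1 base num base
    String.mk (pvBDigitLoop (num.toNat + 1) kp.1 kp.2 num base alphabet.toList [])

-- ===== PRECONDITION & SPEC =====
-- A diverges on num < 0 and on num > 0 with len(alphabet) < 2, and raises IndexError
-- on an empty alphabet: exactly those inputs are excluded.
def Pre_base26_encode (num : Int) (alphabet : String) : Prop :=
  0 ≤ num ∧ 1 ≤ alphabet.toList.length ∧ (num = 0 ∨ 2 ≤ alphabet.toList.length)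
instance (num : Int) (alphabet : String) : Decidable (Pre_base26_encode num alphabet) := by unfold Pre_base26_encode; infer_instance

def pvWitness_base26_encode : Int × String := (12345, "ABCDEFGHIJKLMNOPQRSTUVWXYZ")

def Spec_base26_encode (num : Int) (alphabet : String) (out : String) : Prop := out = base26_encode_alt num alphabet
instance (num : Int) (alphabet : String) (out : String) : Decidable (Spec_base26_encode num alphabet out) := by unfold Spec_base26_encode; infer_instance

-- ===== CLAIM (what is proved, stated in full; the proofs are below) =====
def Claim_equal_base26_encode : Prop := ∀ (num : Int) (alphabet : String), Dom_base26_encode num alphabet → Pre_base26_encode num alphabet → Spec_base26_encode num alphabet (base26_encode num alphabet)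

-- ===== LEMMAS AND PROOFS =====

-- digits of n, most significant first, over k positions: [n/b^(k-1)%b, …, n/b^0%b]
def pvMsb (k n b : Nat) : List Nat :=
  match k with
  | 0 => []
  | k + 1 => (n / b ^ k % b) :: pvMsb k n b

theorem pvMsb_snoc (k n b : Nat) : pvMsb (k + 1) n b = pvMsb k (n / b) b ++ [n % b] := by
  induction k generalizing n with
  | zero => simp [pvMsb]
  | succ k ih =>
    have h : n / b ^ (k + 1) = (n / b) / b ^ k := by
      rw [pow_succ', Nat.div_div_eq_div_mul]
    calc pvMsb (k + 2) n b = (n / b ^ (k+1) % b) :: pvMsb (k + 1) n b := rfl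
      _ = ((n / b) / b ^ k % b) :: (pvMsb k (n / b) b ++ [n % b]) := by rw [h, ih]
      _ = pvMsb (k + 1) (n / b) b ++ [n % b] := rfl

-- the reverse of Nat.digits is exactly pvMsb at the right width
theorem digits_reverse_eq_pvMsb (b : Nat) (hb : 2 ≤ b) :
    ∀ (k n : Nat), b ^ k ≤ n → n < b ^ (k + 1) →
      (Nat.digits b n).reverse = pvMsb (k + 1) n b := by
  intro k
  induction k with
  | zero =>
    intro n h1 h2
    simp only [pow_zero] at h1
    have h2' : n < b := by simpa using h2
    rw [Nat.digits_def' (by omega : 1 < b) (by omega : 0 < n)]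
    rw [Nat.div_eq_of_lt h2', Nat.digits_zero]
    simp [pvMsb, Nat.mod_eq_of_lt h2']
  | succ k ih =>
    intro n h1 h2
    have hb0 : 0 < b := by omega
    have hn : 0 < n := by
      have := Nat.one_le_pow (k + 1) b hb0
      omega
    rw [Nat.digits_def' (by omega : 1 < b) hn]
    have hlo : b ^ k ≤ n / b := by
      rw [Nat.le_div_iff_mul_le hb0, ← pow_succ]; exact h1
    have hhi : n / b < b ^ (k + 1) := by
      rw [Nat.div_lt_iff_lt_mul hb0, ← pow_succ]; exact h2
    rw [List.reverse_cons, ih (n / b) hlo hhi, ← pvMsb_snoc]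

-- A's loop with accumulator = accumulator ++ loop from empty
theorem pvALoop_acc (fuel : Nat) (num base : Int) (al arr : List Char) :
    pvALoop fuel num base al arr = arr ++ pvALoop fuel num base al [] := by
  induction fuel generalizing num arr with
  | zero => simp [pvALoop]
  | succ f ih =>
    simp only [pvALoop]
    by_cases h : num = 0
    · simp [h]
    · simp only [h, if_false]
      rw [ih _ ([] ++ _), ih _ (arr ++ _)]
      simp

-- A's loop collects Nat.digits (least significant first), mapped through the alphabet
theorem pvALoop_eq_digits (b : Nat) (hb : 2 ≤ b) (al : List Char) :
    ∀ (n fuel : Nat), n < fuel →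
      pvALoop fuel (n : Int) (b : Int) al []
        = (Nat.digits b n).map (fun d => (PySem.List.pyGet? al ((d : Nat) : Int)).getD 'A') := by
  intro n
  induction n using Nat.strong_induction_on with
  | _ n ih =>
    intro fuel hfuel
    match fuel, hfuel with
    | fuel + 1, hfuel =>
      by_cases h : n = 0
      · simp [h, pvALoop]
      · have hn : 0 < n := Nat.pos_of_ne_zero h
        simp only [pvALoop, Nat.cast_eq_zero, h, if_false]
        rw [pvALoop_acc]
        rw [PySem.Int.mod_natCast, PySem.Int.floordiv_natCast]
        have hlt : n / b < n := Nat.div_lt_self hn (by omega)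
        rw [ih (n / b) hlt fuel (by omega)]
        rw [Nat.digits_def' (by omega : 1 < b) hn]
        simp only [List.map_cons, List.nil_append, List.singleton_append]

-- B's digit loop with accumulator = accumulator ++ loop from empty
theorem pvBDigitLoop_acc (fuel : Nat) (k p num base : Int) (al out : List Char) :
    pvBDigitLoop fuel k p num base al out = out ++ pvBDigitLoop fuel k p num base al [] := by
  induction fuel generalizing k p out with
  | zero => simp [pvBDigitLoop]
  | succ f ih =>
    simp only [pvBDigitLoop]
    by_cases h : k = 0
    · simp [h]
    · simp only [h, if_false]
      rw [ih _ _ ([] ++ _), ih _ _ (out ++ _)]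
      simp

-- the power loop returns (M, b^M) with b^(M-1) ≤ n < b^M
theorem pvBPowLoop_spec (b n : Nat) (hb : 2 ≤ b) :
    ∀ (fuel K : Nat), 1 ≤ K → b ^ (K - 1) ≤ n → n + 1 - b ^ K ≤ fuel →
      ∃ M : Nat, 1 ≤ M ∧
        pvBPowLoop fuel (K : Int) ((b ^ K : Nat) : Int) (n : Int) (b : Int)
          = ((M : Int), ((b ^ M : Nat) : Int)) ∧ b ^ (M - 1) ≤ n ∧ n < b ^ M := by
  intro fuel
  induction fuel with
  | zero =>
    intro K hK hlo hfuel
    exact ⟨K, hK, rfl, hlo, by omega⟩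
  | succ f ih =>
    intro K hK hlo hfuel
    simp only [pvBPowLoop]
    by_cases h : ((b ^ K : Nat) : Int) ≤ (n : Int)
    · have hle : b ^ K ≤ n := by exact_mod_cast h
      have hgrow : b ^ K + 1 ≤ b ^ (K + 1) := by
        have h1 : 1 ≤ b ^ K := Nat.one_le_pow _ _ (by omega)
        have : 2 * b ^ K ≤ b * b ^ K := Nat.mul_le_mul_right _ (by omega)
        calc b ^ K + 1 ≤ 2 * b ^ K := by omega
          _ ≤ b * b ^ K := this
          _ = b ^ (K + 1) := (pow_succ' b K).symm
      obtain ⟨M, hM1, heq, hMlo, hMhi⟩ :=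
        ih (K + 1) (by omega) (by simpa using hle) (by omega)
      refine ⟨M, hM1, ?_, hMlo, hMhi⟩
      have e1 : (K : Int) + 1 = ((K + 1 : Nat) : Int) := by push_cast; ring
      have e2 : ((b ^ K : Nat) : Int) * (b : Int) = ((b ^ (K + 1) : Nat) : Int) := by
        push_cast [pow_succ]; ring
      rw [if_pos h, e1, e2, heq]
    · have hgt : n < b ^ K := by
        have := lt_of_not_ge h
        exact_mod_cast this
      exact ⟨K, hK, by rw [if_neg h], hlo, hgt⟩

-- B's digit loop emits pvMsb, mapped through the alphabet
theorem pvBDigitLoop_eq_pvMsb (b n : Nat) (hb : 2 ≤ b) (al : List Char) :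
    ∀ (K fuel : Nat), K ≤ fuel →
      pvBDigitLoop fuel (K : Int) ((b ^ K : Nat) : Int) (n : Int) (b : Int) al []
        = (pvMsb K n b).map (fun d => (PySem.List.pyGet? al ((d : Nat) : Int)).getD 'A') := by
  intro K
  induction K with
  | zero =>
    intro fuel _
    match fuel with
    | 0 => simp [pvBDigitLoop, pvMsb]
    | f + 1 => simp [pvBDigitLoop, pvMsb]
  | succ K ih =>
    intro fuel hfuel
    match fuel, hfuel with
    | f + 1, hfuel =>
      have hK0 : ((K : Int) + 1) ≠ 0 := by positivity
      simp only [pvBDigitLoop, Nat.cast_succ, hK0, if_false]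
      have hp : PySem.Int.floordiv ((b ^ (K + 1) : Nat) : Int) (b : Int)
          = ((b ^ K : Nat) : Int) := by
        rw [PySem.Int.floordiv_natCast]
        congr 1
        rw [pow_succ, Nat.mul_div_cancel _ (by omega : 0 < b)]
      have hk1 : (K : Int) + 1 - 1 = (K : Int) := by ring
      rw [hp, hk1, PySem.Int.floordiv_natCast, PySem.Int.mod_natCast]
      rw [pvBDigitLoop_acc]
      rw [ih f (by omega)]
      simp only [pvMsb, List.map_cons, List.nil_append, List.singleton_append]

-- ===== VERDICT (by name: the statement is the Claim_ definition above) =====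
theorem base26_encode_spec : Claim_equal_base26_encode := by
  intro num alphabet _ hpre
  obtain ⟨hnum, hlen, hcase⟩ := hpre
  unfold Spec_base26_encode base26_encode base26_encode_alt
  by_cases h : num = 0
  · simp [h]
  · simp only [h, if_false]
    have hb : 2 ≤ alphabet.toList.length := by
      rcases hcase with h0 | h2
      · exact absurd h0 h
      · exact h2
    set b := alphabet.toList.length with hbdef
    set n := num.toNat with hndef
    have hn : 0 < n := by omega
    have hnum_cast : num = (n : Int) := by omega
    have hbase : PySem.Str.len alphabet = (b : Int) := by
      simp [PySem.Str.len, hbdef]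
    rw [hnum_cast, hbase]
    -- A's side
    have hA := pvALoop_eq_digits b hb alphabet.toList n (n + 1) (by omega)
    -- B's side: power loop
    obtain ⟨M, hM1, hPow, hMlo, hMhi⟩ :=
      pvBPowLoop_spec b n hb (n + 1) 1 le_rfl (by simpa using hn) (by omega)
    norm_num at hPow
    rw [hPow]
    -- M ≤ n + 1, so fuel suffices for the digit loop
    have hMn : M ≤ n + 1 := by
      have h2M : M - 1 < 2 ^ (M - 1) := Nat.lt_two_pow_self
      have : 2 ^ (M - 1) ≤ b ^ (M - 1) := Nat.pow_le_pow_left (by omega) _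
      omega
    have hB := pvBDigitLoop_eq_pvMsb b n hb alphabet.toList M (n + 1) hMn
    push_cast at hB
    simp only at hB ⊢
    rw [hA, hB]
    -- digits reversed = pvMsb
    have hM' : M - 1 + 1 = M := by omega
    have hd := digits_reverse_eq_pvMsb b hb (M - 1) n hMlo (by rw [hM']; exact hMhi)
    rw [hM'] at hd
    rw [← List.map_reverse, hd]
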